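-- pv_equiv track=rewrite | github.com/ffyuanda/problems | src/tool box.py | flip_diag
-- ===== SOURCE A (Python) =====
-- import math
--
-- def flip_diag(in_list):
--
--     center = math.floor((len(in_list) - 1) / 2)
--     marker = math.ceil((len(in_list) - 1) / 2)
--     for i in range(len(in_list)):
--         for j in range(len(in_list)):
--             if i == j:
--                 alt = in_list[i][center + marker - j]
--                 in_list[i][center + marker - j] = in_list[i][j]
--                 in_list[i][j] = alt
--     return in_list
-- ===== SOURCE B (Python) =====
-- def flip_diag(in_list):
--     n = len(in_list)
--     for i, row in enumerate(in_list):
--         row[i], row[n - 1 - i] = row[n - 1 - i], row[i]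
--     return in_list
-- ===== Notes on version B (the rewrite author's own statement) =====
-- stated objective: alternative
-- what changed: A scans all r*r index pairs (i,j) over the r rows and acts only when i==j; B makes a single enumerate pass over the rows, swapping row[i] and row[n-1-i] by one tuple assignment per row; both mutate the argument in place and return it.
import Mathlib
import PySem

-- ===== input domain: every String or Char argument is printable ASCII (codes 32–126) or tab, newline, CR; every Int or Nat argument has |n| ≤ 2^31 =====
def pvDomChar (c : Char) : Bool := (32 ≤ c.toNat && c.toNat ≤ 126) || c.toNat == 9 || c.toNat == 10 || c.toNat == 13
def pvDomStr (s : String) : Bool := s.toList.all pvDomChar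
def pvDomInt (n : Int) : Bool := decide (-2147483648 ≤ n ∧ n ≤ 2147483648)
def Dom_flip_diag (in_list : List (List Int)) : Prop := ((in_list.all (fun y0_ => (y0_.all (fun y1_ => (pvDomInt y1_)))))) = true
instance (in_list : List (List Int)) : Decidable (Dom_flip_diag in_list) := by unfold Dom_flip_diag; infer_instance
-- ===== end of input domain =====

-- B replaces A's O(n^2) nested index scan by a single pass that swaps row[i] and row[n-1-i]
-- in each row; both A and B mutate the argument in place and return it (same observable
-- mutation), and the theorems here are about the return value.

-- ===== PORT A =====
-- math.floor((len-1)/2) and math.ceil((len-1)/2) are exact floor/ceiling divisions by 2 here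
-- (the float quotient (len-1)/2 is exact for every list length below 2^52).
def flip_diag (in_list : List (List Int)) : List (List Int) :=
  let n : Int := in_list.length
  let center : Int := PySem.Int.floordiv (n - 1) 2
  let marker : Int := -(PySem.Int.floordiv (-(n - 1)) 2)
  (PySem.List.pyRange 0 n 1).foldl (fun m i =>
    (PySem.List.pyRange 0 n 1).foldl (fun m j =>
      if i = j then
        let alt := PySem.List.pyGetD (PySem.List.pyGetD m i []) (center + marker - j) 0
        let m1 := PySem.List.pySetD m i
          (PySem.List.pySetD (PySem.List.pyGetD m i []) (center + marker - j)
            (PySem.List.pyGetD (PySem.List.pyGetD m i []) j 0))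
        PySem.List.pySetD m1 i (PySem.List.pySetD (PySem.List.pyGetD m1 i []) j alt)
      else m) m) in_list

-- ===== PORT B =====
-- for i, row in enumerate(in_list): row[i], row[n-1-i] = row[n-1-i], row[i]
-- (tuple assignment: both right-hand sides read the original row, then assigned left to right)
def flip_diag_alt (in_list : List (List Int)) : List (List Int) :=
  let n : Int := in_list.length
  (PySem.List.enumerate in_list 0).map (fun p =>
    PySem.List.pySetD
      (PySem.List.pySetD p.2 p.1 (PySem.List.pyGetD p.2 (n - 1 - p.1) 0))
      (n - 1 - p.1) (PySem.List.pyGetD p.2 p.1 0))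

-- ===== PRECONDITION & SPEC =====
-- Pre_ excludes exactly the inputs on which the Python A raises IndexError: some row i is too
-- short to hold both column i and column len-1-i (B raises on exactly the same inputs).
def Pre_flip_diag (in_list : List (List Int)) : Prop :=
  ((PySem.List.enumerate in_list 0).all (fun p =>
    decide (p.1 < (p.2.length : Int) ∧ (in_list.length : Int) - 1 - p.1 < (p.2.length : Int)))) = true
instance (in_list : List (List Int)) : Decidable (Pre_flip_diag in_list) := by
  unfold Pre_flip_diag; infer_instance

def pvWitness_flip_diag : List (List Int) := [[1, 2], [3, 4]]

def Spec_flip_diag (in_list : List (List Int)) (out : List (List Int)) : Prop := out = flip_diag_alt in_list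
instance (in_list : List (List Int)) (out : List (List Int)) : Decidable (Spec_flip_diag in_list out) := by unfold Spec_flip_diag; infer_instance

-- ===== CLAIM (what is proved, stated in full; the proofs are below) =====
def Claim_equal_flip_diag : Prop := ∀ (in_list : List (List Int)), Dom_flip_diag in_list → Pre_flip_diag in_list → Spec_flip_diag in_list (flip_diag in_list)

-- ===== LEMMAS AND PROOFS =====

-- A's body of the outer loop after the inner loop has fired at its single hit j = i
def pvStepA (n : Int) (acc : List (List Int)) (i : Int) : List (List Int) :=
  let alt := PySem.List.pyGetD (PySem.List.pyGetD acc i []) (n - 1 - i) 0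
  let m1 := PySem.List.pySetD acc i
    (PySem.List.pySetD (PySem.List.pyGetD acc i []) (n - 1 - i)
      (PySem.List.pyGetD (PySem.List.pyGetD acc i []) i 0))
  PySem.List.pySetD m1 i (PySem.List.pySetD (PySem.List.pyGetD m1 i []) i alt)

-- A's per-row swap: write column n-1-i first (with the old row[i]), then column i (old row[n-1-i])
def pvSwapA (n i : Int) (row : List Int) : List Int :=
  PySem.List.pySetD
    (PySem.List.pySetD row (n - 1 - i) (PySem.List.pyGetD row i 0))
    i (PySem.List.pyGetD row (n - 1 - i) 0)

lemma pv_foldl_skip {α : Type} (i : Int) (F : List α → Int → List α) (l : List Int) (m : List α)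
    (h : ∀ j ∈ l, i ≠ j) :
    l.foldl (fun acc j => if i = j then F acc j else acc) m = m := by
  rw [PySem.List.foldl_congr_mem _ _ (fun acc _ => acc) m
    (by intro acc x hx; simp [h x hx])]
  exact List.foldl_fixed l

-- a guarded loop over range(n) fires exactly once, at j = i
lemma pv_inner_eq {α : Type} (n i : Int) (hi0 : 0 ≤ i) (hin : i < n) (m : List α)
    (F : List α → Int → List α) :
    (PySem.List.pyRange 0 n 1).foldl (fun acc j => if i = j then F acc j else acc) m = F m i := by
  rw [PySem.List.pyRange_one_append 0 i n hi0 hin.le, List.foldl_append,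
      pv_foldl_skip i F _ m (by intro j hj; have := (PySem.List.mem_pyRange_one).1 hj; omega),
      PySem.List.pyRange_one_cons hin]
  simp only [List.foldl_cons, if_pos]
  exact pv_foldl_skip i F _ _ (by intro j hj; have := (PySem.List.mem_pyRange_one).1 hj; omega)

-- collapsing the double write at row i into a single row update
lemma pv_step_eq (n i : Int) (m : List (List Int)) (hi0 : 0 ≤ i) (him : i < (m.length : Int)) :
    pvStepA n m i = PySem.List.pySetD m i (pvSwapA n i (PySem.List.pyGetD m i [])) := by
  have hget : ∀ r1 : List Int, PySem.List.pyGetD (m.set i.toNat r1) i [] = r1 := by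
    intro r1
    rw [PySem.List.pyGetD_eq_getElem _ _ hi0 (by simp; omega)]
    exact List.getElem_set_self (by simp; omega)
  simp only [pvStepA, PySem.List.pySetD_of_nonneg _ _ hi0, hget, List.set_set, pvSwapA]

-- the outer loop of single-row updates is a map over the enumerated rows
lemma pv_outer (n : Int) :
    ∀ (m pref : List (List Int)),
      (PySem.List.pyRange (pref.length : Int) ((pref.length : Int) + (m.length : Int)) 1).foldl
        (pvStepA n) (pref ++ m)
      = pref ++ (PySem.List.enumerate m (pref.length : Int)).map (fun p => pvSwapA n p.1 p.2) := by
  intro m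
  induction m with
  | nil =>
    intro pref
    simp [PySem.List.pyRange_one_eq_nil, PySem.List.enumerate_nil]
  | cons r m ih =>
    intro pref
    have hcons : PySem.List.pyRange (pref.length : Int) ((pref.length : Int) + ((r :: m).length : Int)) 1
        = (pref.length : Int) :: PySem.List.pyRange ((pref.length : Int) + 1) ((pref.length : Int) + ((r :: m).length : Int)) 1 := by
      rw [PySem.List.pyRange_one_cons]; simp
    have hget : PySem.List.pyGetD (pref ++ r :: m) (pref.length : Int) [] = r := by
      rw [PySem.List.pyGetD_natCast]
      simp [List.getD]
    have hset : ∀ v : List Int, PySem.List.pySetD (pref ++ r :: m) (pref.length : Int) v = pref ++ v :: m := by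
      intro v
      rw [PySem.List.pySetD_natCast]
      simp
    rw [hcons]
    simp only [List.foldl_cons]
    rw [pv_step_eq n _ _ (by positivity) (by simp), hget, hset]
    have := ih (pref ++ [pvSwapA n (pref.length : Int) r])
    rw [PySem.List.enumerate_cons, List.map_cons, List.append_cons pref _ m,
        List.append_cons pref _ (List.map _ _)]
    push_cast at this ⊢
    convert this using 3 <;> simp <;> try ring

lemma pv_mem_enumerate_bounds (p : Int × List Int) (l : List (List Int))
    (h : p ∈ PySem.List.enumerate l 0) : 0 ≤ p.1 ∧ p.1 < (l.length : Int) := by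
  have hm : p.1 ∈ (PySem.List.enumerate l 0).map (·.1) := List.mem_map_of_mem h
  rw [PySem.List.map_fst_enumerate] at hm
  have := (PySem.List.mem_pyRange_one).1 (by simpa using hm)
  omega

-- with both indices in range, A's write order equals B's write order
lemma pv_swap_eq (n i : Int) (row : List Int) (h0 : 0 ≤ i) (h1 : i < n)
    (hi : i < (row.length : Int)) (hj : n - 1 - i < (row.length : Int)) :
    pvSwapA n i row
    = PySem.List.pySetD (PySem.List.pySetD row i (PySem.List.pyGetD row (n - 1 - i) 0))
        (n - 1 - i) (PySem.List.pyGetD row i 0) := by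
  have hb0 : (0:Int) ≤ n - 1 - i := by omega
  simp only [pvSwapA, PySem.List.pySetD_of_nonneg _ _ h0, PySem.List.pySetD_of_nonneg _ _ hb0]
  by_cases hab : i.toNat = (n - 1 - i).toNat
  · have hval : PySem.List.pyGetD row i 0 = PySem.List.pyGetD row (n - 1 - i) 0 := by
      rw [PySem.List.pyGetD_eq_getElem _ _ h0 hi, PySem.List.pyGetD_eq_getElem _ _ hb0 hj]
      simp only [hab]
    simp only [hab, hval, List.set_set]
  · exact List.set_comm _ _ (fun h => hab h.symm)

-- ===== VERDICT (by name: the statement is the Claim_ definition above) =====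
theorem flip_diag_spec : Claim_equal_flip_diag := by
  intro in_list _ hpre
  unfold Spec_flip_diag
  set n : Int := (in_list.length : Int) with hn
  have hc : PySem.Int.floordiv (n - 1) 2 + -(PySem.Int.floordiv (-(n - 1)) 2) = n - 1 := by
    rw [PySem.Int.floordiv_eq_ediv_of_pos (by omega : (0:Int) < 2),
        PySem.Int.floordiv_eq_ediv_of_pos (by omega : (0:Int) < 2)]
    omega
  have hA : flip_diag in_list
      = (PySem.List.pyRange 0 n 1).foldl (pvStepA n) in_list := by
    unfold flip_diag
    apply PySem.List.foldl_congr_mem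
    intro acc i hi
    obtain ⟨hi0, hin⟩ := (PySem.List.mem_pyRange_one).1 hi
    have hrw : ∀ j : Int, PySem.Int.floordiv (n - 1) 2 + -(PySem.Int.floordiv (-(n - 1)) 2) - j = n - 1 - j := by
      intro j; omega
    simp only [← hn, hrw]
    exact pv_inner_eq n i hi0 hin acc _
  have houter := pv_outer n in_list []
  simp only [List.length_nil, Nat.cast_zero, zero_add, List.nil_append] at houter
  rw [hA]
  rw [← hn] at houter
  rw [houter]
  unfold flip_diag_alt
  simp only [← hn]
  apply List.map_congr_left
  intro p hp
  obtain ⟨hp0, hpn⟩ := pv_mem_enumerate_bounds p in_list hp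
  have hall := (List.all_eq_true).1 hpre p hp
  have hb := of_decide_eq_true hall
  exact pv_swap_eq n p.1 p.2 hp0 hpn hb.1 (by rw [hn]; exact hb.2)
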